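-- pv_equiv track=rewrite | github.com/TechXXX/gmail-calendar-sweep | gmail_candidate_scan/calendar_integration.py | _titlecase_token
-- ===== SOURCE A (Python) =====
-- def _titlecase_token(token: str) -> str:
--     separators = "-,./"
--     for separator in separators:
--         if separator in token:
--             return separator.join(_titlecase_token(piece) for piece in token.split(separator))
--     if not token:
--         return token
--     if token.isdigit():
--         return token
--     return token[:1].upper() + token[1:]
-- ===== SOURCE B (Python) =====
-- def _seg(piece: str) -> str:
--     if not piece or piece.isdigit():
--         return piece
--     return piece[:1].upper() + piece[1:]
--
--
-- def _titlecase_token(token: str) -> str: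
--     out = []
--     buf = []
--     for ch in token:
--         if ch in "-,./":
--             out.append(_seg("".join(buf)))
--             out.append(ch)
--             buf = []
--         else:
--             buf.append(ch)
--     out.append(_seg("".join(buf)))
--     return "".join(out)
-- ===== Notes on version B (the rewrite author's own statement) =====
-- stated objective: alternative
-- what changed: Replaces A's nested recursion (find a separator, split on it, recurse on every piece, rejoin, up to 4 levels deep) with a single left-to-right scan that buffers the current segment and emits its titlecased form at each separator.
import Mathlib
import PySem

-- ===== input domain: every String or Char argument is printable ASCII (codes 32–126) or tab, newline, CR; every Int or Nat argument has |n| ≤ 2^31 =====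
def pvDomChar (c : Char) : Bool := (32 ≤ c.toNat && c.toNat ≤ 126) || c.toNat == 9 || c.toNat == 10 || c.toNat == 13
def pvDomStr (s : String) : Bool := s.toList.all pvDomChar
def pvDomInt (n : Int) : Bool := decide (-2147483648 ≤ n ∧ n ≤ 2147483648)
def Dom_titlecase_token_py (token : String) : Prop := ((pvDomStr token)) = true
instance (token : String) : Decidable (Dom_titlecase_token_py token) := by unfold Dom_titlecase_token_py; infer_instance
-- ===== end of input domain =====

-- B replaces A's recursive split-and-rejoin with one buffered left-to-right scan over the characters (objective: alternative, single pass).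

-- ===== PORT A =====
-- helper characterisation of Python's str.split on a single-character separator,
-- needed (with the length lemma below) for the termination of the port's recursion
def pvSplitC (c : Char) : List Char → List (List Char)
  | [] => [[]]
  | d :: t => if d = c then [] :: pvSplitC c t
              else (pvSplitC c t).modifyHead (d :: ·)

theorem pvSplitC_ne_nil (c : Char) (s : List Char) : pvSplitC c s ≠ [] := by
  cases s with
  | nil => simp [pvSplitC]
  | cons d t =>
    simp only [pvSplitC]
    split_ifs
    · simp
    · cases h : pvSplitC c t with
      | nil => exact absurd h (pvSplitC_ne_nil c t)
      | cons p ps => simp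

theorem pv_splitOn_go_eq (c : Char) :
    ∀ (fuel : Nat) (l cur : List Char) (acc : List (List Char)), l.length ≤ fuel →
      PySem.Chars.splitOn.go [c] fuel l cur acc
        = acc.reverse ++ (pvSplitC c l).modifyHead (cur.reverse ++ ·) := by
  intro fuel
  induction fuel with
  | zero =>
    intro l cur acc hl
    have : l = [] := by cases l <;> simp_all
    subst this
    simp [PySem.Chars.splitOn.go, pvSplitC]
  | succ n ih =>
    intro l cur acc hl
    cases l with
    | nil => simp [PySem.Chars.splitOn.go, pvSplitC]
    | cons d t =>
      simp only [PySem.Chars.splitOn.go]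
      by_cases hd : d = c
      · subst hd
        have hpre : List.isPrefixOf [d] (d :: t) = true := by simp [List.isPrefixOf]
        rw [if_pos hpre]
        have := ih t [] (cur.reverse :: acc) (by simpa using Nat.le_of_succ_le_succ hl)
        simp only [List.length_cons, List.length_nil, List.drop_succ_cons, List.drop_zero] at this ⊢
        rw [this]
        simp only [pvSplitC]
        cases pvSplitC d t <;> simp
      · have hpre : List.isPrefixOf [c] (d :: t) = false := by
          simp [List.isPrefixOf, Ne.symm hd]
        rw [if_neg (by simp [hpre])]
        have := ih t (d :: cur) acc (by simpa using Nat.le_of_succ_le_succ hl)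
        rw [this]
        simp only [pvSplitC, if_neg hd]
        congr 1
        cases h : pvSplitC c t with
        | nil => exact absurd h (pvSplitC_ne_nil c t)
        | cons p ps => simp

theorem pv_splitOn_eq (c : Char) (s : List Char) :
    PySem.Chars.splitOn s [c] = pvSplitC c s := by
  unfold PySem.Chars.splitOn
  rw [pv_splitOn_go_eq c (s.length + 1) s [] [] (by omega)]
  cases h : pvSplitC c s with
  | nil => exact absurd h (pvSplitC_ne_nil c s)
  | cons p ps => simp

theorem pvSplitC_length_le (c : Char) (s : List Char) :
    ∀ p ∈ pvSplitC c s, p.length ≤ s.length := by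
  induction s with
  | nil => intro p hp; simp [pvSplitC] at hp; simp [hp]
  | cons d t ih =>
    intro p hp
    simp only [pvSplitC] at hp
    split_ifs at hp with hd
    · rcases List.mem_cons.mp hp with h | h
      · simp [h]
      · have := ih p h; simp; omega
    · obtain ⟨q, qs, h⟩ := List.exists_cons_of_ne_nil (pvSplitC_ne_nil c t)
      rw [h] at hp
      simp only [List.modifyHead_cons, List.mem_cons] at hp
      rcases hp with h' | h'
      · subst h'
        have := ih q (by rw [h]; simp)
        simp; omega
      · have := ih p (by rw [h]; simp [h']); simp; omega

theorem pvSplitC_length_lt (c : Char) (s : List Char) (hc : c ∈ s) :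
    ∀ p ∈ pvSplitC c s, p.length < s.length := by
  induction s with
  | nil => simp at hc
  | cons d t ih =>
    intro p hp
    simp only [pvSplitC] at hp
    split_ifs at hp with hd
    · rcases List.mem_cons.mp hp with h | h
      · simp [h]
      · have := pvSplitC_length_le c t p h; simp; omega
    · have hct : c ∈ t := by
        rcases List.mem_cons.mp hc with h | h
        · exact absurd h.symm hd
        · exact h
      obtain ⟨q, qs, h⟩ := List.exists_cons_of_ne_nil (pvSplitC_ne_nil c t)
      rw [h] at hp
      simp only [List.modifyHead_cons, List.mem_cons] at hp
      rcases hp with h' | h'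
      · subst h'
        have := ih hct q (by rw [h]; simp)
        simp; omega
      · have := ih hct p (by rw [h]; simp [h']); simp; omega

theorem pv_splitOn_length_lt (c : Char) (s : List Char) (hc : c ∈ s) :
    ∀ p ∈ PySem.Chars.splitOn s [c], p.length < s.length := by
  rw [pv_splitOn_eq]
  exact pvSplitC_length_lt c s hc

theorem pv_isIn_singleton (c : Char) (s : List Char) :
    PySem.Chars.isIn [c] s = true → c ∈ s := by
  intro h
  have := (PySem.Chars.isIn_iff_infix [c] s).mp h
  rcases this with ⟨l, r, hlr⟩
  subst hlr
  simp

-- port of A: recursion on the token; each piece of a split is strictly shorter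
def pvGoA (s : List Char) : List Char :=
  if h1 : PySem.Chars.isIn ['-'] s then
    PySem.Chars.join ['-'] ((PySem.Chars.splitOn s ['-']).attach.map (fun p => pvGoA p.1))
  else if h2 : PySem.Chars.isIn [','] s then
    PySem.Chars.join [','] ((PySem.Chars.splitOn s [',']).attach.map (fun p => pvGoA p.1))
  else if h3 : PySem.Chars.isIn ['.'] s then
    PySem.Chars.join ['.'] ((PySem.Chars.splitOn s ['.']).attach.map (fun p => pvGoA p.1))
  else if h4 : PySem.Chars.isIn ['/'] s then
    PySem.Chars.join ['/'] ((PySem.Chars.splitOn s ['/']).attach.map (fun p => pvGoA p.1))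
  else if s = [] then s
  else if PySem.Chars.strIsdigit s then s
  else PySem.Chars.upper (PySem.Chars.slice s none (some 1)) ++ PySem.Chars.slice s (some 1) none
termination_by s.length
decreasing_by
  · exact pv_splitOn_length_lt '-' s (pv_isIn_singleton '-' s h1) p.1 p.2
  · exact pv_splitOn_length_lt ',' s (pv_isIn_singleton ',' s h2) p.1 p.2
  · exact pv_splitOn_length_lt '.' s (pv_isIn_singleton '.' s h3) p.1 p.2
  · exact pv_splitOn_length_lt '/' s (pv_isIn_singleton '/' s h4) p.1 p.2

def titlecase_token_py (token : String) : String :=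
  String.ofList (pvGoA token.toList)

-- ===== PORT B =====
-- port of Source B's helper _seg
def pvSeg (s : List Char) : List Char :=
  if s = [] ∨ PySem.Chars.strIsdigit s then s
  else PySem.Chars.upper (PySem.Chars.slice s none (some 1)) ++ PySem.Chars.slice s (some 1) none

-- port of Source B's loop: state = (out, buf)
def pvStepB (st : List (List Char) × List Char) (ch : Char) : List (List Char) × List Char :=
  if ch ∈ ['-', ',', '.', '/'] then (st.1 ++ [pvSeg st.2, [ch]], [])
  else (st.1, st.2 ++ [ch])

def titlecase_token_py_alt (token : String) : String :=
  let st := token.toList.foldl pvStepB ([], [])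
  String.ofList (PySem.Chars.join [] (st.1 ++ [pvSeg st.2]))

-- ===== PRECONDITION & SPEC =====
def Spec_titlecase_token_py (token : String) (out : String) : Prop := out = titlecase_token_py_alt token
instance (token : String) (out : String) : Decidable (Spec_titlecase_token_py token out) := by unfold Spec_titlecase_token_py; infer_instance

-- ===== CLAIM (what is proved, stated in full; the proofs are below) =====
def Claim_equal_titlecase_token_py : Prop := ∀ (token : String), Dom_titlecase_token_py token → Spec_titlecase_token_py token (titlecase_token_py token)

-- ===== LEMMAS AND PROOFS =====

-- recursive reading of B's scan, used only in the proofs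
def pvGoB : List Char → List Char → List Char
  | [], buf => pvSeg buf
  | d :: t, buf =>
      if d ∈ ['-', ',', '.', '/'] then pvSeg buf ++ d :: pvGoB t []
      else pvGoB t (buf ++ [d])

theorem pv_join_nil (ps : List (List Char)) : PySem.Chars.join [] ps = ps.flatten := by
  induction ps with
  | nil => simp [PySem.Chars.join, List.intercalate]
  | cons p qs ih =>
    cases qs with
    | nil => simp [PySem.Chars.join, List.intercalate]
    | cons q rs =>
      simp only [PySem.Chars.join, List.intercalate, List.intersperse,
        List.flatten_cons] at ih ⊢
      simp [ih]

theorem pv_foldl_eq_goB :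
    ∀ (l : List Char) (out : List (List Char)) (buf : List Char),
      PySem.Chars.join [] ((l.foldl pvStepB (out, buf)).1 ++ [pvSeg (l.foldl pvStepB (out, buf)).2])
        = PySem.Chars.join [] out ++ pvGoB l buf := by
  intro l
  induction l with
  | nil => intro out buf; simp [pvGoB, pv_join_nil]
  | cons d t ih =>
    intro out buf
    simp only [List.foldl_cons, pvStepB, pvGoB]
    split_ifs with hd
    · rw [ih]
      simp [pv_join_nil]
    · rw [ih]

theorem pv_join_splitC (c : Char) (s : List Char) :
    PySem.Chars.join [c] (pvSplitC c s) = s := by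
  induction s with
  | nil => simp [pvSplitC, PySem.Chars.join, List.intercalate]
  | cons d t ih =>
    simp only [pvSplitC]
    split_ifs with hd
    · subst hd
      cases h : pvSplitC d t with
      | nil => exact absurd h (pvSplitC_ne_nil d t)
      | cons q qs =>
        rw [h] at ih
        simp only [PySem.Chars.join, List.intercalate] at ih ⊢
        simp only [List.intersperse] at ih ⊢
        simpa using ih
    · cases h : pvSplitC c t with
      | nil => exact absurd h (pvSplitC_ne_nil c t)
      | cons q qs =>
        rw [h] at ih
        cases qs with
        | nil =>
          simp only [PySem.Chars.join, List.intercalate, List.intersperse] at ih ⊢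
          simp at ih ⊢; simp [ih]
        | cons q2 qs2 =>
          simp only [PySem.Chars.join, List.intercalate, List.intersperse] at ih ⊢
          simp at ih ⊢; simp [ih]

theorem pv_goB_sep (c : Char) (hc : c ∈ ['-', ',', '.', '/']) :
    ∀ (x y buf : List Char), pvGoB (x ++ c :: y) buf = pvGoB x buf ++ c :: pvGoB y [] := by
  intro x
  induction x with
  | nil => intro y buf; simp [pvGoB, hc]
  | cons d t ih =>
    intro y buf
    simp only [List.cons_append, pvGoB]
    split_ifs with hd
    · rw [ih]; simp
    · rw [ih]

theorem pv_goB_join (c : Char) (hc : c ∈ ['-', ',', '.', '/']) :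
    ∀ (ps : List (List Char)), ps ≠ [] →
      pvGoB (PySem.Chars.join [c] ps) [] = PySem.Chars.join [c] (ps.map (fun p => pvGoB p [])) := by
  intro ps
  induction ps with
  | nil => intro h; exact absurd rfl h
  | cons p qs ih =>
    intro _
    cases qs with
    | nil => simp [PySem.Chars.join, List.intercalate, List.intersperse]
    | cons q rs =>
      have hj : PySem.Chars.join [c] (p :: q :: rs) = p ++ c :: PySem.Chars.join [c] (q :: rs) := by
        simp [PySem.Chars.join, List.intercalate]
      have hj2 : PySem.Chars.join [c] ((p :: q :: rs).map (fun p => pvGoB p []))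
          = pvGoB p [] ++ c :: PySem.Chars.join [c] ((q :: rs).map (fun p => pvGoB p [])) := by
        simp [PySem.Chars.join, List.intercalate, List.intersperse]
      rw [hj, pv_goB_sep c hc, hj2, ih (by simp)]

theorem pv_goB_nosep :
    ∀ (s buf : List Char), (∀ d ∈ s, d ∉ (['-', ',', '.', '/'] : List Char)) →
      pvGoB s buf = pvSeg (buf ++ s) := by
  intro s
  induction s with
  | nil => intro buf _; simp [pvGoB]
  | cons d t ih =>
    intro buf h
    simp only [pvGoB]
    rw [if_neg (h d (by simp))]
    rw [ih (buf ++ [d]) (fun e he => h e (by simp [he]))]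
    simp

theorem pv_notIn_singleton (c : Char) (s : List Char) :
    PySem.Chars.isIn [c] s = false → c ∉ s := by
  intro h hc
  have : PySem.Chars.isIn [c] s = true := by
    apply (PySem.Chars.isIn_iff_infix [c] s).mpr
    rcases List.mem_iff_append.mp hc with ⟨l, r, hlr⟩
    exact ⟨l, r, by simp [hlr]⟩
  simp [this] at h

theorem pv_case (c : Char) (hc : c ∈ ['-', ',', '.', '/']) (s : List Char)
    (_hin : PySem.Chars.isIn [c] s = true)
    (IH : ∀ p ∈ pvSplitC c s, pvGoA p = pvGoB p []) :
    PySem.Chars.join [c] ((PySem.Chars.splitOn s [c]).attach.map (fun p => pvGoA p.1))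
      = pvGoB s [] := by
  have h1 : (PySem.Chars.splitOn s [c]).attach.map (fun p => pvGoA p.1)
      = (pvSplitC c s).map (fun p => pvGoB p []) := by
    rw [List.attach_map_val, pv_splitOn_eq]
    exact List.map_congr_left IH
  rw [h1]
  rw [← pv_goB_join c hc (pvSplitC c s) (pvSplitC_ne_nil c s)]
  rw [pv_join_splitC]

theorem pv_main : ∀ (s : List Char), pvGoA s = pvGoB s [] := by
  intro s
  induction s using (measure List.length).wf.induction with
  | _ s IH =>
  have IH' : ∀ c ∈ (['-', ',', '.', '/'] : List Char), PySem.Chars.isIn [c] s = true →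
      ∀ p ∈ pvSplitC c s, pvGoA p = pvGoB p [] := by
    intro c _ hin p hp
    exact IH p (pvSplitC_length_lt c s (pv_isIn_singleton c s hin) p hp)
  rw [pvGoA]
  split_ifs with h1 h2 h3 h4 h5 h6
  · exact pv_case '-' (by simp) s h1 (IH' '-' (by simp) h1)
  · exact pv_case ',' (by simp) s h2 (IH' ',' (by simp) h2)
  · exact pv_case '.' (by simp) s h3 (IH' '.' (by simp) h3)
  · exact pv_case '/' (by simp) s h4 (IH' '/' (by simp) h4)
  all_goals {
    have hns : ∀ d ∈ s, d ∉ (['-', ',', '.', '/'] : List Char) := by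
      intro d hd hmem
      simp only [List.mem_cons, List.not_mem_nil, or_false] at hmem
      rcases hmem with h | h | h | h <;> subst h
      · exact absurd hd (pv_notIn_singleton _ s (by simpa using h1))
      · exact absurd hd (pv_notIn_singleton _ s (by simpa using h2))
      · exact absurd hd (pv_notIn_singleton _ s (by simpa using h3))
      · exact absurd hd (pv_notIn_singleton _ s (by simpa using h4))
    rw [pv_goB_nosep s [] hns]
    simp [pvSeg, h5]
    try simp [h6]
  }

-- ===== VERDICT (by name: the statement is the Claim_ definition above) =====
theorem titlecase_token_py_spec : Claim_equal_titlecase_token_py := by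
  intro token _
  show String.ofList (pvGoA token.toList)
      = String.ofList (PySem.Chars.join []
          ((token.toList.foldl pvStepB ([], [])).1 ++ [pvSeg (token.toList.foldl pvStepB ([], [])).2]))
  rw [pv_foldl_eq_goB token.toList [] [], pv_main]
  simp [PySem.Chars.join, List.intercalate]
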